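-- pv_equiv track=rewrite | github.com/ubarotov/Fundamentals-of-Programming | Lab2/lab.py | actors_with_bacon_number
-- ===== SOURCE A (Python) =====
-- def actors_with_bacon_number(data, n):
--     """
--     Parameters
--     ----------
--     data : list of tuples.
--         Each tuple has three elements: ID of actor1, ID of actor2, and ID of the movie
--         where actor1 and actor2 played together.
--
--     n : integer
--
--     Returns
--     -------
--     a set of integers, where each integer is an ID of some actor. This set contains all actors who are separated from
--     Kevin Bacon with n movies. My algorithm uses breadth-first search.
--
--     """
--     actors_dict = {} #contains all actors as keys and their nearest neighbors as values (sets).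
--     for elem in data:
--         if elem[0] != elem[1]:
--             actors_dict.setdefault(elem[0], set()).add(elem[1])
--             actors_dict.setdefault(elem[1], set()).add(elem[0])
--     seen = {4724} # contains all of the names of actors at the deepest level in a breadth-first search.
--
--     if n == 0:
--         return seen
--     else:
--         for i in range(n):
--             set_new = set() # this set is used to collect names of actors in the next depth of breadth-first search.
--             for actor1 in seen:
--                 for actor2 in actors_dict[actor1]:
--                     if actor2 in actors_dict.keys() and actor2 not in seen:
--                         set_new.add(actor2)
--             for item in seen:
--                 del actors_dict[item]
--             if len(set_new) == 0:
--                 return set()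
--             seen = set_new
--         return set_new
-- ===== SOURCE B (Python) =====
-- def actors_with_bacon_number(data, n):
--     # Single-queue BFS with an explicit visited set instead of A's level-by-level
--     # loop that deletes visited keys from the adjacency dict.
--     adj = {}
--     for a, b, _m in data:
--         if a != b:
--             adj.setdefault(a, set()).add(b)
--             adj.setdefault(b, set()).add(a)
--     if n == 0:
--         return {4724}
--     result = set()
--     visited = {4724}
--     queue = [(4724, 0)]
--     i = 0
--     while i < len(queue):
--         actor, dist = queue[i]
--         i += 1
--         if dist == n:
--             result.add(actor)
--         elif dist < n:
--             for nb in adj[actor]: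
--                 if nb not in visited:
--                     visited.add(nb)
--                     queue.append((nb, dist + 1))
--     return result
-- ===== Notes on version B (the rewrite author's own statement) =====
-- stated objective: alternative
-- what changed: Replaces A's level-by-level BFS (rebuilding a frontier set each round and deleting visited keys from the adjacency dict) with a classic single-queue BFS carrying (actor, distance) pairs and an explicit visited set, collecting actors popped at distance exactly n.
import Mathlib
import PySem

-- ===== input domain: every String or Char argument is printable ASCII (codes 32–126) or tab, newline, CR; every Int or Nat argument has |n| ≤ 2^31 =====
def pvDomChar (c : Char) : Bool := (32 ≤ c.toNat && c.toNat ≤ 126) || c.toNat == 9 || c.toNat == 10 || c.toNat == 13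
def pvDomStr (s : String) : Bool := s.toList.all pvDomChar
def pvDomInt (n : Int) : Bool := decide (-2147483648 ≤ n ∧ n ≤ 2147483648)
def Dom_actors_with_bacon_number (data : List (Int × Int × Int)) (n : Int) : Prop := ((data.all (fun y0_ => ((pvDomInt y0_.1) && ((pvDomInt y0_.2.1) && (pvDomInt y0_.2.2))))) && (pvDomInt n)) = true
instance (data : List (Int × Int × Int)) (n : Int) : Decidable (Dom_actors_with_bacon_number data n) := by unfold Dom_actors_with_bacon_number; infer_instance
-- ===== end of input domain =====

-- B replaces A's level-by-level BFS (which deletes visited keys from the adjacency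
-- dict) with a classic single-queue BFS over (actor, distance) pairs and a visited
-- set; same return value on every input where the Python A returns (objective:
-- alternative decomposition, not claimed faster).

-- ===== PORT A =====
-- adjacency dict building (the same Python lines open both A and B; shared helper)
def pvAdj (data : List (Int × Int × Int)) : PySem.Dict Int (PySem.Set Int) :=
  data.foldl (fun d e =>
    if e.1 ≠ e.2.1 then
      (d.modify e.1 PySem.Set.empty (fun s => s.add e.2.1)).modify e.2.1 PySem.Set.empty (fun s => s.add e.1)
    else d) PySem.Dict.empty

-- actors_dict[a]; total via getD — Pre_ excludes the one input shape where the
-- Python lookup raises KeyError (n > 0 with 4724 absent from the dict)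
def pvNbrs (adj : PySem.Dict Int (PySem.Set Int)) (a : Int) : PySem.Set Int :=
  (adj.get? a).getD PySem.Set.empty

-- the two nested 'for' loops collecting set_new for one level
def pvACollect (adj : PySem.Dict Int (PySem.Set Int)) (seen : PySem.Set Int) : PySem.Set Int :=
  seen.foldl (fun acc a1 =>
    (pvNbrs adj a1).foldl (fun acc a2 =>
      if adj.contains a2 && !(PySem.Set.contains seen a2) then acc.add a2 else acc) acc)
    PySem.Set.empty

-- 'for i in range(n)' with the early 'return set()' ; fuel 0 returns the current
-- seen (= set_new of the last iteration, A's 'return set_new')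
def pvALoop (adj : PySem.Dict Int (PySem.Set Int)) (seen : PySem.Set Int) : Nat → List Int
  | 0 => seen
  | k+1 =>
    let setNew := pvACollect adj seen
    let adj' := seen.foldl (fun d item => d.erase item) adj
    if setNew.length == 0 then [] else pvALoop adj' setNew k

def actors_with_bacon_number (data : List (Int × Int × Int)) (n : Int) : List Int :=
  let adj := pvAdj data
  let seen : PySem.Set Int := PySem.Set.add PySem.Set.empty 4724
  if n == 0 then seen
  else pvALoop adj seen n.toNat

-- ===== PORT B =====
-- the 'while i < len(queue)' loop; the queue only ever holds at most one entry per
-- visited actor, so 2*len(data)+1 fuel strictly exceeds the possible pop count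
def pvBLoop (adj : PySem.Dict Int (PySem.Set Int)) (n : Int) :
    List (Int × Int) → PySem.Set Int → PySem.Set Int → Nat → List Int
  | [], _, res, _ => res
  | _ :: _, _, res, 0 => res
  | (a, d) :: rest, vis, res, k+1 =>
    if d == n then pvBLoop adj n rest vis (res.add a) k
    else if d < n then
      let st := (pvNbrs adj a).foldl
        (fun (st : PySem.Set Int × List (Int × Int)) x =>
          if st.1.contains x then st else (st.1.add x, st.2 ++ [(x, d+1)])) (vis, rest)
      pvBLoop adj n st.2 st.1 res k
    else pvBLoop adj n rest vis res k

def actors_with_bacon_number_alt (data : List (Int × Int × Int)) (n : Int) : List Int :=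
  let adj := pvAdj data
  if n == 0 then PySem.Set.add PySem.Set.empty 4724
  else pvBLoop adj n [(4724, 0)] (PySem.Set.add PySem.Set.empty 4724) PySem.Set.empty
        (2 * data.length + 1)

-- ===== PRECONDITION & SPEC =====
-- Pre_ = exactly where the Python A returns: n ≥ 0 (range(n) never binds set_new
-- for n < 0 → UnboundLocalError) and, for n > 0, 4724 must be an endpoint of some
-- edge with distinct endpoints (else actors_dict[4724] raises KeyError).
def Pre_actors_with_bacon_number (data : List (Int × Int × Int)) (n : Int) : Prop :=
  0 ≤ n ∧ (n = 0 ∨ ∃ e ∈ data, e.1 ≠ e.2.1 ∧ (e.1 = 4724 ∨ e.2.1 = 4724))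
instance (data : List (Int × Int × Int)) (n : Int) : Decidable (Pre_actors_with_bacon_number data n) := by
  unfold Pre_actors_with_bacon_number; infer_instance
def pvWitness_actors_with_bacon_number : (List (Int × Int × Int)) × Int := ([(4724, 1, 0)], 1)

def Spec_actors_with_bacon_number (data : List (Int × Int × Int)) (n : Int) (out : List Int) : Prop := out = actors_with_bacon_number_alt data n
instance (data : List (Int × Int × Int)) (n : Int) (out : List Int) : Decidable (Spec_actors_with_bacon_number data n out) := by unfold Spec_actors_with_bacon_number; infer_instance

-- ===== CLAIM (what is proved, stated in full; the proofs are below) =====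
def Claim_equal_actors_with_bacon_number : Prop := ∀ (data : List (Int × Int × Int)) (n : Int), Dom_actors_with_bacon_number data n → Pre_actors_with_bacon_number data n → Spec_actors_with_bacon_number data n (actors_with_bacon_number data n)
-- ===== LEMMAS AND PROOFS =====

-- B's inner enqueue step, on plain actor lists (the (·, d+1) tagging is peeled off
-- by pvPairFold below)
def pvStepP (st : PySem.Set Int × List Int) (x : Int) : PySem.Set Int × List Int :=
  if st.1.contains x then st else (st.1.add x, st.2 ++ [x])

-- B's processing of one whole BFS level, as a fold
def pvCollect (adj : PySem.Dict Int (PySem.Set Int)) (st : PySem.Set Int × List Int)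
    (xs : List Int) : PySem.Set Int × List Int :=
  xs.foldl (fun st a => (pvNbrs adj a).foldl pvStepP st) st

lemma pvGet?Erase {ν : Type} (d : PySem.Dict Int ν) (k j : Int) (h : j ≠ k) :
    (d.erase k).get? j = d.get? j := by
  show Option.map _ (List.find? _ (List.filter _ d.items)) = _
  rw [List.find?_filter]
  have hpred : (fun (a : Int × ν) => decide ((!a.1 == k) = true ∧ (a.1 == j) = true))
      = (fun (p : Int × ν) => p.1 == j) := by
    funext p
    by_cases hp : p.1 = j
    · simp [hp, h]
    · simp [hp]
  rw [hpred]
  rfl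

lemma pvContainsErase {ν : Type} (d : PySem.Dict Int ν) (k j : Int) :
    (d.erase k).contains j = (d.contains j && !(j == k)) := by
  by_cases hjk : j = k
  · subst hjk
    simp only [beq_self_eq_true, Bool.not_true, Bool.and_false]
    show (List.filter _ d.items).any _ = false
    rw [List.any_filter]
    rw [List.any_eq_false]
    intro p _
    by_cases hp : p.1 = j <;> simp [hp]
  · show (List.filter _ d.items).any _ = _
    rw [List.any_filter]
    have hpred : (fun (p : Int × ν) => !p.1 == k && p.1 == j) = (fun p => p.1 == j) := by
      funext p
      by_cases hp : p.1 = j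
      · simp [hp, hjk]
      · simp [hp]
    rw [hpred]
    simp [PySem.Dict.contains, hjk]

lemma pvGet?EraseFold {ν : Type} (dels : List Int) (d : PySem.Dict Int ν) (j : Int)
    (h : j ∉ dels) : (dels.foldl (fun d i => d.erase i) d).get? j = d.get? j := by
  induction dels generalizing d with
  | nil => rfl
  | cons k rest ih =>
    simp only [List.foldl_cons]
    simp only [List.mem_cons, not_or] at h
    rw [ih (d.erase k) h.2, pvGet?Erase d k j h.1]

lemma pvContainsEraseFold {ν : Type} (dels : List Int) (d : PySem.Dict Int ν) (j : Int) :
    (dels.foldl (fun d i => d.erase i) d).contains j = (d.contains j && !(decide (j ∈ dels))) := by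
  induction dels generalizing d with
  | nil => simp
  | cons k rest ih =>
    simp only [List.foldl_cons, ih, pvContainsErase]
    by_cases h1 : j = k <;> by_cases h2 : j ∈ rest <;> simp [h1, h2]

lemma pvNbrsGetD (d : PySem.Dict Int (PySem.Set Int)) (a : Int) :
    pvNbrs d a = d.getD a PySem.Set.empty := (PySem.Dict.getD_eq_get?_getD d a _).symm

lemma pvStepClosed (d : PySem.Dict Int (PySem.Set Int)) (e : Int × Int × Int) (he : e.1 ≠ e.2.1)
    (hd : ∀ a x, x ∈ pvNbrs d a → d.contains x = true) :
    ∀ a x, x ∈ pvNbrs ((d.modify e.1 PySem.Set.empty (fun s => s.add e.2.1)).modify e.2.1 PySem.Set.empty (fun s => s.add e.1)) a →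
      ((d.modify e.1 PySem.Set.empty (fun s => s.add e.2.1)).modify e.2.1 PySem.Set.empty (fun s => s.add e.1)).contains x = true := by
  intro a x hx
  rw [pvNbrsGetD, PySem.Dict.getD_modify] at hx
  rw [PySem.Dict.contains_modify, PySem.Dict.contains_modify]
  by_cases h1 : a = e.2.1
  · rw [if_pos h1, PySem.Dict.getD_modify, if_neg (Ne.symm he)] at hx
    rcases (PySem.Set.mem_add _ _ _).mp hx with h | h
    · have := hd a x (by rw [pvNbrsGetD, h1]; exact h)
      simp [this]
    · simp [h]
  · rw [if_neg h1, PySem.Dict.getD_modify] at hx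
    by_cases h2 : a = e.1
    · rw [if_pos h2] at hx
      rcases (PySem.Set.mem_add _ _ _).mp hx with h | h
      · have := hd a x (by rw [pvNbrsGetD, h2]; exact h)
        simp [this]
      · simp [h]
    · rw [if_neg h2] at hx
      have := hd a x (by rw [pvNbrsGetD]; exact hx)
      simp [this]

lemma pvNodupKeysModify (d : PySem.Dict Int (PySem.Set Int)) (k : Int) (d0 : PySem.Set Int)
    (f : PySem.Set Int → PySem.Set Int) (h : d.keys.Nodup) : (d.modify k d0 f).keys.Nodup := by
  rw [PySem.Dict.keys_modify]
  by_cases hc : d.contains k = true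
  · rw [PySem.Dict.keys_insert_of_contains _ _ hc]; exact h
  · rw [PySem.Dict.keys_insert_of_not_contains _ _ (by simpa using hc)]
    refine List.Nodup.append h (List.nodup_singleton k) ?_
    intro a ha hb
    simp only [List.mem_singleton] at hb
    subst hb
    exact hc ((PySem.Dict.contains_iff_mem_keys d a).mpr ha)

lemma pvLenKeysModify (d : PySem.Dict Int (PySem.Set Int)) (k : Int) (d0 : PySem.Set Int)
    (f : PySem.Set Int → PySem.Set Int) : (d.modify k d0 f).keys.length ≤ d.keys.length + 1 := by
  rw [PySem.Dict.keys_modify]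
  by_cases hc : d.contains k = true
  · rw [PySem.Dict.keys_insert_of_contains _ _ hc]; omega
  · rw [PySem.Dict.keys_insert_of_not_contains _ _ (by simpa using hc)]; simp

-- every member of every neighbor set of pvAdj is itself a key of pvAdj
lemma pvAdjClosedAux (l : List (Int × Int × Int)) (d : PySem.Dict Int (PySem.Set Int))
    (hd : ∀ a x, x ∈ pvNbrs d a → d.contains x = true) :
    ∀ a x, x ∈ pvNbrs (l.foldl (fun d e =>
      if e.1 ≠ e.2.1 then
        (d.modify e.1 PySem.Set.empty (fun s => s.add e.2.1)).modify e.2.1 PySem.Set.empty (fun s => s.add e.1)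
      else d) d) a → (l.foldl (fun d e =>
      if e.1 ≠ e.2.1 then
        (d.modify e.1 PySem.Set.empty (fun s => s.add e.2.1)).modify e.2.1 PySem.Set.empty (fun s => s.add e.1)
      else d) d).contains x = true := by
  induction l generalizing d with
  | nil => exact hd
  | cons e rest ih =>
    simp only [List.foldl_cons]
    by_cases he : e.1 ≠ e.2.1
    · simp only [if_pos he]
      exact ih _ (pvStepClosed d e he hd)
    · simp only [if_neg he]
      exact ih _ hd

lemma pvAdjClosed (data : List (Int × Int × Int)) :
    ∀ a x, x ∈ pvNbrs (pvAdj data) a → (pvAdj data).contains x = true := by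
  apply pvAdjClosedAux
  intro a x hx
  simp [pvNbrs, PySem.Dict.get?, PySem.Dict.empty] at hx

lemma pvKeysNodupAux (l : List (Int × Int × Int)) (d : PySem.Dict Int (PySem.Set Int))
    (hd : d.keys.Nodup) :
    (l.foldl (fun d e =>
      if e.1 ≠ e.2.1 then
        (d.modify e.1 PySem.Set.empty (fun s => s.add e.2.1)).modify e.2.1 PySem.Set.empty (fun s => s.add e.1)
      else d) d).keys.Nodup := by
  induction l generalizing d with
  | nil => exact hd
  | cons e rest ih =>
    simp only [List.foldl_cons]
    by_cases he : e.1 ≠ e.2.1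
    · simp only [if_pos he]
      exact ih _ (pvNodupKeysModify _ _ _ _ (pvNodupKeysModify _ _ _ _ hd))
    · simp only [if_neg he]
      exact ih _ hd

lemma pvKeysLenAux (l : List (Int × Int × Int)) (d : PySem.Dict Int (PySem.Set Int)) :
    (l.foldl (fun d e =>
      if e.1 ≠ e.2.1 then
        (d.modify e.1 PySem.Set.empty (fun s => s.add e.2.1)).modify e.2.1 PySem.Set.empty (fun s => s.add e.1)
      else d) d).keys.length ≤ d.keys.length + 2 * l.length := by
  induction l generalizing d with
  | nil => simp
  | cons e rest ih =>
    simp only [List.foldl_cons, List.length_cons]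
    by_cases he : e.1 ≠ e.2.1
    · simp only [if_pos he]
      have h1 := ih ((d.modify e.1 PySem.Set.empty (fun s => s.add e.2.1)).modify e.2.1 PySem.Set.empty (fun s => s.add e.1))
      have h2 := pvLenKeysModify (d.modify e.1 PySem.Set.empty (fun s => s.add e.2.1)) e.2.1 PySem.Set.empty (fun s => s.add e.1)
      have h3 := pvLenKeysModify d e.1 PySem.Set.empty (fun s => s.add e.2.1)
      omega
    · simp only [if_neg he]
      have h1 := ih d
      omega

lemma pvPairFold (d1 : Int) (nbs : List Int) :
    ∀ (vis : PySem.Set Int) (p : List (Int × Int)) (ys : List Int),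
    nbs.foldl (fun (st : PySem.Set Int × List (Int × Int)) x =>
        if st.1.contains x then st else (st.1.add x, st.2 ++ [(x, d1)]))
      (vis, p ++ ys.map (fun a => (a, d1)))
    = ((nbs.foldl pvStepP (vis, ys)).1,
       p ++ ((nbs.foldl pvStepP (vis, ys)).2).map (fun a => (a, d1))) := by
  induction nbs with
  | nil => intro vis p ys; rfl
  | cons x rest ih =>
    intro vis p ys
    simp only [List.foldl_cons, pvStepP]
    by_cases h : vis.contains x = true
    · rw [if_pos h, if_pos h]
      exact ih vis p ys
    · rw [if_neg h, if_neg h]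
      have heq : p ++ ys.map (fun a => (a, d1)) ++ [(x, d1)]
          = p ++ (ys ++ [x]).map (fun a => (a, d1)) := by
        simp [List.map_append]
      rw [heq]
      exact ih (vis.add x) p (ys ++ [x])

lemma pvBlevel (adj : PySem.Dict Int (PySem.Set Int)) (n d : Int) (hd : d < n) (xs : List Int) :
    ∀ (ys : List Int) (vis res : PySem.Set Int) (fuel : Nat),
    pvBLoop adj n (xs.map (fun a => (a, d)) ++ ys.map (fun a => (a, d+1))) vis res (fuel + xs.length)
    = pvBLoop adj n ((pvCollect adj (vis, ys) xs).2.map (fun a => (a, d+1)))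
        (pvCollect adj (vis, ys) xs).1 res fuel := by
  induction xs with
  | nil => intro ys vis res fuel; rfl
  | cons a xs ih =>
    intro ys vis res fuel
    have hne : (d == n) = false := by simp [hd.ne]
    show pvBLoop adj n ((a, d) :: (xs.map (fun a => (a, d)) ++ ys.map (fun a => (a, d+1)))) vis res
        ((fuel + xs.length) + 1) = _
    simp only [pvBLoop, hne, Bool.false_eq_true, if_false, if_pos hd]
    rw [pvPairFold]
    rw [ih]
    rfl

lemma pvBdrain (adj : PySem.Dict Int (PySem.Set Int)) (n : Int) (ys : List Int) :
    ∀ (vis res : PySem.Set Int) (fuel : Nat),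
    pvBLoop adj n (ys.map (fun a => (a, n))) vis res (fuel + ys.length)
    = ys.foldl PySem.Set.add res := by
  induction ys with
  | nil => intro vis res fuel; simp [pvBLoop]
  | cons a ys ih =>
    intro vis res fuel
    show pvBLoop adj n ((a, n) :: ys.map (fun a => (a, n))) vis res ((fuel + ys.length) + 1) = _
    simp only [pvBLoop, beq_self_eq_true, if_pos]
    exact ih vis (res.add a) fuel

lemma pvFoldlAddNil (l : List Int) :
    ∀ (acc : PySem.Set Int), acc.Nodup → (∀ x ∈ l, x ∉ acc) → l.Nodup →
    l.foldl PySem.Set.add acc = acc ++ l := by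
  induction l with
  | nil => intro acc _ _ _; simp
  | cons x l ih =>
    intro acc hn hdisj hl
    simp only [List.foldl_cons]
    rw [PySem.Set.add_of_not_mem (hdisj x (by simp))]
    have hnd2 : (acc ++ [x]).Nodup := by
      refine List.Nodup.append hn (List.nodup_singleton x) ?_
      intro a ha hb
      simp only [List.mem_singleton] at hb
      exact hdisj x (by simp) (hb ▸ ha)
    have hdisj2 : ∀ y ∈ l, y ∉ acc ++ [x] := by
      intro y hy
      simp only [List.mem_append, List.mem_singleton, not_or]
      exact ⟨hdisj y (by simp [hy]), fun h => (List.nodup_cons.mp hl).1 (h ▸ hy)⟩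
    rw [ih (acc ++ [x]) hnd2 hdisj2 (List.nodup_cons.mp hl).2]
    simp

lemma hmemc (v : PySem.Set Int) (x : Int) : v.contains x = true ↔ x ∈ v := by
  rw [PySem.Set.contains_eq_decide]; simp

-- counting: processing a level consumes at least its own length of "fresh keys"


lemma pvCount (keys : List Int) (hk : keys.Nodup) (s : List Int) (hs : s.Nodup)
    (hsub : ∀ x ∈ s, x ∈ keys) (vis vis' : PySem.Set Int)
    (hold : ∀ x ∈ s, ¬ (vis.contains x = true))
    (hnew : ∀ x, vis'.contains x = true ↔ vis.contains x = true ∨ x ∈ s) :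
    (keys.filter (fun k => !vis'.contains k)).length + s.length
      ≤ (keys.filter (fun k => !vis.contains k)).length := by
  have hperm : (keys.filter (fun k => decide (k ∈ s))).Perm s := by
    apply (List.perm_ext_iff_of_nodup (hk.filter _) hs).mpr
    intro a
    simp only [List.mem_filter, decide_eq_true_eq]
    exact ⟨fun h => h.2, fun h => ⟨hsub a h, h⟩⟩
  have hlen : (keys.filter (fun k => decide (k ∈ s))).length = s.length := hperm.length_eq
  rw [← hlen]
  have hnd : ((keys.filter (fun k => !vis'.contains k)) ++ (keys.filter (fun k => decide (k ∈ s)))).Nodup := by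
    refine List.Nodup.append (hk.filter _) (hk.filter _) ?_
    intro a ha hb
    simp only [List.mem_filter, Bool.not_eq_eq_eq_not, Bool.not_true, decide_eq_true_eq] at ha hb
    have h3 := (hnew a).mpr (Or.inr hb.2)
    exact Bool.false_ne_true (ha.2.symm.trans h3)
  have hsubl : ((keys.filter (fun k => !vis'.contains k)) ++ (keys.filter (fun k => decide (k ∈ s))))
      ⊆ keys.filter (fun k => !vis.contains k) := by
    intro a ha
    simp only [List.mem_append, List.mem_filter, Bool.not_eq_eq_eq_not, Bool.not_true,
      decide_eq_true_eq] at ha ⊢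
    rcases ha with ⟨h1, h2⟩ | ⟨h1, h2⟩
    · refine ⟨h1, ?_⟩
      cases hv : vis.contains a with
      | false => rfl
      | true =>
        have h3 := (hnew a).mpr (Or.inl hv)
        exact absurd (h2.symm.trans h3) Bool.false_ne_true
    · refine ⟨h1, ?_⟩
      simpa using hold a h2
  have := (hnd.subperm hsubl).length_le
  simpa using this

-- one level: A's nested collection over the erased dict equals B's pvCollect
def pvAStep (E : PySem.Dict Int (PySem.Set Int)) (seen acc : PySem.Set Int) (a2 : Int) : PySem.Set Int :=
  if E.contains a2 && !(PySem.Set.contains seen a2) then acc.add a2 else acc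
def pvAFold (E : PySem.Dict Int (PySem.Set Int)) (seen acc : PySem.Set Int) (u : List Int) : PySem.Set Int :=
  u.foldl (fun acc a1 => (pvNbrs E a1).foldl (pvAStep E seen) acc) acc
lemma pvACollectEq (E : PySem.Dict Int (PySem.Set Int)) (seen : PySem.Set Int) :
    pvACollect E seen = pvAFold E seen [] seen := rfl

lemma pvBNil (adj : PySem.Dict Int (PySem.Set Int)) (n : Int) (vis res : PySem.Set Int) (fuel : Nat) :
    pvBLoop adj n [] vis res fuel = res := by cases fuel <;> rfl

lemma pvInnerEq (adj0 E : PySem.Dict Int (PySem.Set Int)) (dels seen : List Int)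
    (hEc : ∀ y, E.contains y = (adj0.contains y && !(decide (y ∈ dels)))) :
    ∀ (nbs : List Int), (∀ x ∈ nbs, adj0.contains x = true) →
    ∀ (acc vis : PySem.Set Int),
    (∀ y, vis.contains y = true ↔ y ∈ dels ∨ y ∈ seen ∨ y ∈ acc) →
    acc.Nodup → (∀ y ∈ acc, y ∉ dels ∧ y ∉ seen ∧ y ∈ adj0.keys) →
    (nbs.foldl pvStepP (vis, acc)).2 = nbs.foldl (pvAStep E seen) acc
    ∧ (∀ y, (nbs.foldl pvStepP (vis, acc)).1.contains y = true ↔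
        y ∈ dels ∨ y ∈ seen ∨ y ∈ nbs.foldl (pvAStep E seen) acc)
    ∧ (nbs.foldl (pvAStep E seen) acc).Nodup
    ∧ (∀ y ∈ nbs.foldl (pvAStep E seen) acc, y ∉ dels ∧ y ∉ seen ∧ y ∈ adj0.keys) := by
  intro nbs
  induction nbs with
  | nil => exact fun _ acc vis h1 h2 h3 => ⟨rfl, h1, h2, h3⟩
  | cons x rest ih =>
    intro hn acc vis h1 h2 h3
    have hx : adj0.contains x = true := hn x (by simp)
    have hrest : ∀ y ∈ rest, adj0.contains y = true := fun y hy => hn y (by simp [hy])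
    simp only [List.foldl_cons]
    by_cases hxd : x ∈ dels
    · have hb : pvStepP (vis, acc) x = (vis, acc) := by
        unfold pvStepP
        rw [if_pos ((h1 x).mpr (Or.inl hxd))]
      have ha : pvAStep E seen acc x = acc := by
        unfold pvAStep
        rw [hEc x]
        simp [hxd]
      rw [hb, ha]
      exact ih hrest acc vis h1 h2 h3
    · by_cases hxs : x ∈ seen
      · have hb : pvStepP (vis, acc) x = (vis, acc) := by
          unfold pvStepP
          rw [if_pos ((h1 x).mpr (Or.inr (Or.inl hxs)))]
        have ha : pvAStep E seen acc x = acc := by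
          unfold pvAStep
          rw [PySem.Set.contains_eq_decide]
          simp [hxs]
        rw [hb, ha]
        exact ih hrest acc vis h1 h2 h3
      · have hcond : (E.contains x && !(PySem.Set.contains seen x)) = true := by
          rw [hEc x, hx, PySem.Set.contains_eq_decide]
          simp [hxd, hxs]
        by_cases hxa : x ∈ acc
        · have hb : pvStepP (vis, acc) x = (vis, acc) := by
            unfold pvStepP
            rw [if_pos ((h1 x).mpr (Or.inr (Or.inr hxa)))]
          have ha : pvAStep E seen acc x = acc := by
            unfold pvAStep
            rw [hcond, if_pos rfl]
            exact PySem.Set.add_of_mem hxa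
          rw [hb, ha]
          exact ih hrest acc vis h1 h2 h3
        · have hvx : vis.contains x = false := by
            cases hv : vis.contains x with
            | false => rfl
            | true =>
              rcases (h1 x).mp hv with h | h | h
              · exact absurd h hxd
              · exact absurd h hxs
              · exact absurd h hxa
          have hb : pvStepP (vis, acc) x = (vis.add x, acc ++ [x]) := by
            unfold pvStepP
            rw [hvx]
            simp
          have ha : pvAStep E seen acc x = acc ++ [x] := by
            unfold pvAStep
            rw [hcond, if_pos rfl]
            exact PySem.Set.add_of_not_mem hxa
          rw [hb, ha]
          have h1' : ∀ y, (vis.add x).contains y = true ↔ y ∈ dels ∨ y ∈ seen ∨ y ∈ acc ++ [x] := by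
            intro y
            rw [hmemc, PySem.Set.mem_add]
            constructor
            · rintro (hy | rfl)
              · rcases (h1 y).mp ((hmemc vis y).mpr hy) with h | h | h
                · exact Or.inl h
                · exact Or.inr (Or.inl h)
                · exact Or.inr (Or.inr (by simp [h]))
              · exact Or.inr (Or.inr (by simp))
            · rintro (hy | hy | hy)
              · exact Or.inl ((hmemc vis y).mp ((h1 y).mpr (Or.inl hy)))
              · exact Or.inl ((hmemc vis y).mp ((h1 y).mpr (Or.inr (Or.inl hy))))
              · rcases List.mem_append.mp hy with hy2 | hy2
                · exact Or.inl ((hmemc vis y).mp ((h1 y).mpr (Or.inr (Or.inr hy2))))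
                · exact Or.inr (by simpa using hy2)
          have h2' : (acc ++ [x]).Nodup := by
            refine List.Nodup.append h2 (List.nodup_singleton x) ?_
            intro a ha2 hb2
            simp only [List.mem_singleton] at hb2
            exact hxa (hb2 ▸ ha2)
          have h3' : ∀ y ∈ acc ++ [x], y ∉ dels ∧ y ∉ seen ∧ y ∈ adj0.keys := by
            intro y hy
            rcases List.mem_append.mp hy with hy2 | hy2
            · exact h3 y hy2
            · simp only [List.mem_singleton] at hy2
              subst hy2
              exact ⟨hxd, hxs, (PySem.Dict.contains_iff_mem_keys adj0 y).mp hx⟩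
          exact ih hrest (acc ++ [x]) (vis.add x) h1' h2' h3'

lemma pvLevelEq (adj0 E : PySem.Dict Int (PySem.Set Int)) (dels seen : List Int)
    (hEc : ∀ y, E.contains y = (adj0.contains y && !(decide (y ∈ dels))))
    (hEn : ∀ a, a ∉ dels → pvNbrs E a = pvNbrs adj0 a)
    (hclos : ∀ a x, x ∈ pvNbrs adj0 a → adj0.contains x = true)
    (hds : ∀ a ∈ seen, a ∉ dels) :
    ∀ (u : List Int), (∀ a ∈ u, a ∈ seen) →
    ∀ (acc vis : PySem.Set Int),
    (∀ y, vis.contains y = true ↔ y ∈ dels ∨ y ∈ seen ∨ y ∈ acc) →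
    acc.Nodup → (∀ y ∈ acc, y ∉ dels ∧ y ∉ seen ∧ y ∈ adj0.keys) →
    (pvCollect adj0 (vis, acc) u).2 = pvAFold E seen acc u
    ∧ (∀ y, (pvCollect adj0 (vis, acc) u).1.contains y = true ↔
        y ∈ dels ∨ y ∈ seen ∨ y ∈ pvAFold E seen acc u)
    ∧ (pvAFold E seen acc u).Nodup
    ∧ (∀ y ∈ pvAFold E seen acc u, y ∉ dels ∧ y ∉ seen ∧ y ∈ adj0.keys) := by
  intro u
  induction u with
  | nil => exact fun _ acc vis h1 h2 h3 => ⟨rfl, h1, h2, h3⟩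
  | cons a1 u ih =>
    intro hu acc vis h1 h2 h3
    have ha1 : a1 ∈ seen := hu a1 (by simp)
    have hrest : ∀ a ∈ u, a ∈ seen := fun a ha => hu a (by simp [ha])
    obtain ⟨c1, c2, c3, c4⟩ := pvInnerEq adj0 E dels seen hEc (pvNbrs adj0 a1)
      (fun x hx => hclos a1 x hx) acc vis h1 h2 h3
    simp only [pvCollect, pvAFold, List.foldl_cons]
    rw [hEn a1 (hds a1 ha1)]
    have hpair : (pvNbrs adj0 a1).foldl pvStepP (vis, acc)
        = (((pvNbrs adj0 a1).foldl pvStepP (vis, acc)).1, (pvNbrs adj0 a1).foldl (pvAStep E seen) acc) := by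
      rw [← c1]
    rw [hpair]
    exact ih hrest ((pvNbrs adj0 a1).foldl (pvAStep E seen) acc)
      ((pvNbrs adj0 a1).foldl pvStepP (vis, acc)).1 c2 c3 c4

lemma pvMain (adj0 : PySem.Dict Int (PySem.Set Int))
    (hclos : ∀ a x, x ∈ pvNbrs adj0 a → adj0.contains x = true)
    (hknd : adj0.keys.Nodup) (n : Int) :
    ∀ (r : Nat) (dels seen : List Int) (vis : PySem.Set Int) (fuel : Nat),
    1 ≤ r →
    (∀ y, vis.contains y = true ↔ y ∈ dels ∨ y ∈ seen) →
    (∀ a ∈ seen, a ∉ dels) →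
    seen.Nodup →
    seen.length + ((adj0.keys).filter (fun k => !(vis.contains k))).length ≤ fuel →
    pvALoop (dels.foldl (fun d i => d.erase i) adj0) seen r
      = pvBLoop adj0 n (seen.map (fun a => (a, n - (r : Int)))) vis [] fuel := by
  intro r
  induction r with
  | zero => intro _ _ _ _ h; omega
  | succ rr ih =>
    intro dels seen vis fuel _ h1 hds hnod hfuel
    have hEc : ∀ y, (dels.foldl (fun d i => d.erase i) adj0).contains y
        = (adj0.contains y && !(decide (y ∈ dels))) := fun y => pvContainsEraseFold dels adj0 y
    have hEn : ∀ a, a ∉ dels → pvNbrs (dels.foldl (fun d i => d.erase i) adj0) a = pvNbrs adj0 a := by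
      intro a ha
      unfold pvNbrs
      rw [pvGet?EraseFold dels adj0 a ha]
    have h1' : ∀ y, vis.contains y = true ↔ y ∈ dels ∨ y ∈ seen ∨ y ∈ ([] : List Int) := by
      intro y; rw [h1 y]; simp
    obtain ⟨c1, c2, c3, c4⟩ := pvLevelEq adj0 (dels.foldl (fun d i => d.erase i) adj0) dels seen
      hEc hEn hclos hds seen (fun a ha => ha) ([] : List Int) vis h1' List.nodup_nil
      (by intro y hy; cases hy)
    have hA : pvALoop (dels.foldl (fun d i => d.erase i) adj0) seen (rr+1)
        = if (pvACollect (dels.foldl (fun d i => d.erase i) adj0) seen).length == 0 then []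
          else pvALoop (seen.foldl (fun d item => d.erase item) (dels.foldl (fun d i => d.erase i) adj0))
                 (pvACollect (dels.foldl (fun d i => d.erase i) adj0) seen) rr := rfl
    rw [hA, pvACollectEq]
    have hf1 : seen.length ≤ fuel := le_trans (Nat.le_add_right _ _) hfuel
    have hfuel2 : ((adj0.keys).filter (fun k => !(vis.contains k))).length ≤ fuel - seen.length := by
      omega
    rw [show fuel = (fuel - seen.length) + seen.length from (Nat.sub_add_cancel hf1).symm]
    have hq : seen.map (fun a => (a, n - ((rr+1 : Nat) : Int)))
        = seen.map (fun a => (a, n - ((rr+1 : Nat) : Int)))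
          ++ ([] : List Int).map (fun a => (a, (n - ((rr+1 : Nat) : Int)) + 1)) := by simp
    rw [hq, pvBlevel adj0 n (n - ((rr+1 : Nat) : Int)) (by push_cast; omega) seen ([] : List Int)
      vis [] (fuel - seen.length)]
    rw [c1]
    have hvisfalse : ∀ y ∈ pvAFold (dels.foldl (fun d i => d.erase i) adj0) seen [] seen,
        vis.contains y = false := by
      intro y hy
      obtain ⟨hd_, hs_, _⟩ := c4 y hy
      cases hv : vis.contains y with
      | false => rfl
      | true =>
        rcases (h1 y).mp hv with h | h
        · exact absurd h hd_
        · exact absurd h hs_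
    have hsub2 : pvAFold (dels.foldl (fun d i => d.erase i) adj0) seen [] seen
        ⊆ adj0.keys.filter (fun k => !vis.contains k) := by
      intro y hy
      rw [List.mem_filter]
      exact ⟨(c4 y hy).2.2, by rw [hvisfalse y hy]; rfl⟩
    have hlenN : (pvAFold (dels.foldl (fun d i => d.erase i) adj0) seen [] seen).length
        ≤ (adj0.keys.filter (fun k => !vis.contains k)).length := (c3.subperm hsub2).length_le
    cases rr with
    | zero =>
      have hfun : (fun a : Int => (a, n - ((0+1 : Nat) : Int) + 1)) = (fun a : Int => (a, n)) := by
        funext a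
        congr 1
        push_cast
        ring
      rw [hfun]
      have hf2 : (pvAFold (dels.foldl (fun d i => d.erase i) adj0) seen [] seen).length
          ≤ fuel - seen.length := le_trans hlenN hfuel2
      rw [show fuel - seen.length
          = (fuel - seen.length - (pvAFold (dels.foldl (fun d i => d.erase i) adj0) seen [] seen).length)
            + (pvAFold (dels.foldl (fun d i => d.erase i) adj0) seen [] seen).length
          from (Nat.sub_add_cancel hf2).symm]
      rw [pvBdrain]
      rw [pvFoldlAddNil _ [] List.nodup_nil (by intro x _ h; cases h) c3]
      by_cases hsn : pvAFold (dels.foldl (fun d i => d.erase i) adj0) seen [] seen = []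
      · simp [hsn]
      · have hne : ((pvAFold (dels.foldl (fun d i => d.erase i) adj0) seen [] seen).length == 0) = false := by
          simp [hsn]
        rw [hne]
        simp [pvALoop]
    | succ ss =>
      by_cases hsn : pvAFold (dels.foldl (fun d i => d.erase i) adj0) seen [] seen = []
      · rw [hsn]
        simp only [List.map_nil, List.length_nil, pvBNil]
        rfl
      · have hne : ((pvAFold (dels.foldl (fun d i => d.erase i) adj0) seen [] seen).length == 0) = false := by
          simp [hsn]
        rw [hne]
        simp only [Bool.false_eq_true, if_false]
        have hAd : seen.foldl (fun d item => d.erase item) (dels.foldl (fun d i => d.erase i) adj0)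
            = (dels ++ seen).foldl (fun d i => d.erase i) adj0 := List.foldl_append.symm
        rw [hAd]
        have hfun2 : (fun a : Int => (a, n - ((ss+1+1 : Nat) : Int) + 1))
            = (fun a : Int => (a, n - ((ss+1 : Nat) : Int))) := by
          funext a
          congr 1
          push_cast
          ring
        rw [hfun2]
        have h1'' : ∀ y, ((pvCollect adj0 (vis, ([] : List Int)) seen).1).contains y = true ↔
            y ∈ dels ++ seen ∨ y ∈ pvAFold (dels.foldl (fun d i => d.erase i) adj0) seen [] seen := by
          intro y
          rw [c2 y]
          simp [List.mem_append, or_assoc]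
        have hds'' : ∀ a ∈ pvAFold (dels.foldl (fun d i => d.erase i) adj0) seen [] seen,
            a ∉ dels ++ seen := by
          intro a ha
          obtain ⟨hd_, hs_, _⟩ := c4 a ha
          simp [List.mem_append, hd_, hs_]
        have hnew : ∀ y, ((pvCollect adj0 (vis, ([] : List Int)) seen).1).contains y = true ↔
            vis.contains y = true ∨ y ∈ pvAFold (dels.foldl (fun d i => d.erase i) adj0) seen [] seen := by
          intro y
          rw [c2 y, h1 y]
          tauto
        have hcnt := pvCount adj0.keys hknd
          (pvAFold (dels.foldl (fun d i => d.erase i) adj0) seen [] seen) c3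
          (fun x hx => (c4 x hx).2.2) vis ((pvCollect adj0 (vis, ([] : List Int)) seen).1)
          (fun x hx => by rw [hvisfalse x hx]; simp) hnew
        exact ih (dels ++ seen) (pvAFold (dels.foldl (fun d i => d.erase i) adj0) seen [] seen)
          ((pvCollect adj0 (vis, ([] : List Int)) seen).1) (fuel - seen.length)
          (by omega) h1'' hds'' c3 (by omega)

-- ===== VERDICT (by name: the statement is the Claim_ definition above) =====
theorem actors_with_bacon_number_spec : Claim_equal_actors_with_bacon_number := by
  unfold Claim_equal_actors_with_bacon_number
  intro data n _ hpre
  unfold Spec_actors_with_bacon_number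
  unfold actors_with_bacon_number actors_with_bacon_number_alt
  by_cases h0 : n = 0
  · simp [h0]
  · have hbe : (n == 0) = false := by simp [h0]
    simp only [hbe, Bool.false_eq_true, if_false]
    have hge : 0 ≤ n := hpre.1
    have hn1 : 1 ≤ n := by omega
    have hclos := pvAdjClosed data
    have hknd : (pvAdj data).keys.Nodup :=
      pvKeysNodupAux data PySem.Dict.empty (by simp [PySem.Dict.keys_empty])
    have hkl : (pvAdj data).keys.length ≤ 2 * data.length := by
      have h := pvKeysLenAux data PySem.Dict.empty
      simp only [PySem.Dict.keys_empty, List.length_nil, Nat.zero_add] at h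
      exact h
    have hmain := pvMain (pvAdj data) hclos hknd n n.toNat []
      (PySem.Set.add PySem.Set.empty 4724) (PySem.Set.add PySem.Set.empty 4724)
      (2 * data.length + 1)
      (by omega)
      (by
        intro y
        show (PySem.Set.contains [(4724 : Int)] y) = true ↔ y ∈ ([] : List Int) ∨ y ∈ [(4724 : Int)]
        rw [hmemc]
        simp)
      (by
        intro a ha
        simp)
      (by
        show ([(4724 : Int)]).Nodup
        simp)
      (by
        show ([(4724 : Int)]).length + _ ≤ _
        have hfl := List.length_filter_le (fun k => !(PySem.Set.contains (PySem.Set.add PySem.Set.empty 4724) k)) (pvAdj data).keys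
        simp only [List.length_singleton]
        omega)
    have hq : (PySem.Set.add PySem.Set.empty 4724).map (fun a => (a, n - ((n.toNat : Nat) : Int)))
        = [((4724 : Int), (0 : Int))] := by
      show ([(4724 : Int)]).map _ = _
      simp [Int.toNat_of_nonneg hge]
    rw [hq] at hmain
    exact hmain
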